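-- pv_equiv track=rewrite | github.com/stefs/evelyn-reminder | src/evelyn_reminder/client/bot/__init__.py | multiline
-- ===== SOURCE A (Python) =====
-- def multiline(
--         text: str
-- ) -> str:
--     text = [line.strip() for line in text.split('\n')]
--     while text and not text[0]:
--         del text[0]
--     while text and not text[-1]:
--         del text[-1]
--     return '\n'.join(text)
-- ===== SOURCE B (Python) =====
-- def multiline(
--         text: str
-- ) -> str:
--     stripped = [line.strip() for line in text.split('\n')]
--     nonempty = [i for i, line in enumerate(stripped) if line]
--     if not nonempty:
--         return ''
--     return '\n'.join(stripped[nonempty[0]:nonempty[-1] + 1])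
-- ===== Notes on version B (the rewrite author's own statement) =====
-- stated objective: simpler
-- what changed: B replaces A's two destructive while-loops that repeatedly delete blank boundary lines with one pass that collects the indices of non-empty stripped lines and returns the join of a single slice between the first and last such index.
import Mathlib
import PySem

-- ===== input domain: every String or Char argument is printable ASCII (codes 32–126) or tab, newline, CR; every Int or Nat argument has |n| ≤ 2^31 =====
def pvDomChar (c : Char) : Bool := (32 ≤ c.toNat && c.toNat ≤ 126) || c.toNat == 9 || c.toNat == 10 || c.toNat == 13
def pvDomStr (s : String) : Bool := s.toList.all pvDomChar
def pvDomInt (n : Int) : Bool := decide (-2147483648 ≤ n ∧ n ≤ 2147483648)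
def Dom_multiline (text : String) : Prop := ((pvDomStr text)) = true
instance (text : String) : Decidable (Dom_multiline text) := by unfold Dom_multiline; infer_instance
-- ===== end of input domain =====

-- B replaces A's two destructive while-loops that delete blank boundary lines one by one
-- with a single slice between the first and last non-empty stripped line (objective: simpler).

-- ===== PORT A =====
-- while text and not text[0]: del text[0]
def dropLeadingBlank : List String → List String
  | [] => []
  | x :: xs => if x = "" then dropLeadingBlank xs else x :: xs

-- while text and not text[-1]: del text[-1]
def dropTrailingBlank (xs : List String) : List String :=
  if h : xs ≠ [] ∧ PySem.List.pyGetD xs (-1) "" = "" then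
    dropTrailingBlank xs.dropLast
  else xs
termination_by xs.length
decreasing_by
  have hne : xs ≠ [] := h.1
  have : 0 < xs.length := List.length_pos_iff.mpr hne
  simp [List.length_dropLast]; omega

def multiline (text : String) : String :=
  -- text.split('\n') (the separator is non-empty, so split? always returns some)
  let t := ((PySem.Str.split? text "\n").getD []).map PySem.Str.strip
  PySem.Str.join "\n" (dropTrailingBlank (dropLeadingBlank t))

-- ===== PORT B =====
-- nonempty = [i for i, line in enumerate(stripped) if line]
def neOf (xs : List String) : List Int :=
  ((PySem.List.enumerate xs).filter (fun p => !(p.2 == ""))).map (·.1)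

-- '' if nonempty is empty else '\n'.join(stripped[nonempty[0]:nonempty[-1] + 1])
def trimBlankEnds (xs : List String) : List String :=
  match neOf xs with
  | [] => []
  | i :: _ =>
      PySem.List.slice xs (some i) (some (PySem.List.pyGetD (neOf xs) (-1) 0 + 1))

def multiline_alt (text : String) : String :=
  let stripped := ((PySem.Str.split? text "\n").getD []).map PySem.Str.strip
  PySem.Str.join "\n" (trimBlankEnds stripped)

-- ===== PRECONDITION & SPEC =====
def Spec_multiline (text : String) (out : String) : Prop := out = multiline_alt text
instance (text : String) (out : String) : Decidable (Spec_multiline text out) := by unfold Spec_multiline; infer_instance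

-- ===== CLAIM (what is proved, stated in full; the proofs are below) =====
def Claim_equal_multiline : Prop := ∀ (text : String), Dom_multiline text → Spec_multiline text (multiline text)

-- ===== LEMMAS AND PROOFS =====

-- A's first while-loop is dropWhile on "is blank".
theorem dropLeadingBlank_eq_dropWhile (xs : List String) :
    dropLeadingBlank xs = xs.dropWhile (fun s => s == "") := by
  induction xs with
  | nil => rfl
  | cons x xs ih =>
      by_cases hx : x = "" <;> simp [dropLeadingBlank, hx, ih]

-- A's second while-loop is rdropWhile on "is blank".
theorem dropTrailingBlank_eq_rdropWhile (xs : List String) :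
    dropTrailingBlank xs = xs.rdropWhile (fun s => s == "") := by
  fun_induction dropTrailingBlank xs with
  | case1 xs h ih =>
      obtain ⟨hne, hlast⟩ := h
      rcases List.eq_nil_or_concat' xs with rfl | ⟨ys, a, rfl⟩
      · exact absurd rfl hne
      · rw [PySem.List.pyGetD_neg_one_append_singleton] at hlast
        rw [List.rdropWhile_concat, if_pos (by simp [hlast])]
        simpa using ih
  | case2 xs h =>
      rcases List.eq_nil_or_concat' xs with rfl | ⟨ys, a, rfl⟩
      · simp [List.rdropWhile_nil]
      · rw [not_and_or] at h
        have ha : ¬ a = "" := by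
          rcases h with h | h
          · exact absurd (by simp) h
          · rwa [PySem.List.pyGetD_neg_one_append_singleton] at h
        rw [List.rdropWhile_concat, if_neg (by simp [ha])]

theorem enumerate_shift {α : Type} (xs : List α) (s : Int) :
    PySem.List.enumerate xs (s + 1) =
      (PySem.List.enumerate xs s).map (fun p => (p.1 + 1, p.2)) := by
  induction xs generalizing s with
  | nil => simp [PySem.List.enumerate_nil]
  | cons x xs ih => simp [PySem.List.enumerate_cons, ih (s + 1)]

theorem neOf_cons (x : String) (xs : List String) :
    neOf (x :: xs) = (if x = "" then [] else [(0 : Int)]) ++ (neOf xs).map (· + 1) := by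
  unfold neOf
  rw [PySem.List.enumerate_cons, show (0 : Int) + 1 = 0 + 1 by ring, enumerate_shift]
  by_cases hx : x = "" <;>
    simp [hx, List.filter_map, Function.comp_def]

theorem neOf_nonneg (xs : List String) : ∀ i ∈ neOf xs, 0 ≤ i := by
  intro i hi
  unfold neOf at hi
  simp only [List.mem_map, List.mem_filter] at hi
  obtain ⟨p, ⟨hp, _⟩, rfl⟩ := hi
  rw [PySem.List.mem_enumerate_iff] at hp
  obtain ⟨k, hk, rfl⟩ := hp
  simp

theorem neOf_eq_nil_iff (xs : List String) :
    neOf xs = [] ↔ ∀ x ∈ xs, x = "" := by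
  unfold neOf
  simp only [List.map_eq_nil_iff, List.filter_eq_nil_iff]
  constructor
  · intro h x hx
    obtain ⟨k, hk, rfl⟩ := List.mem_iff_getElem.mp hx
    have := h (0 + k, xs[k]) (by rw [PySem.List.mem_enumerate_iff]; exact ⟨k, hk, rfl⟩)
    simpa using this
  · intro h p hp
    rw [PySem.List.mem_enumerate_iff] at hp
    obtain ⟨k, hk, rfl⟩ := hp
    simpa using h xs[k] (by simp)

-- the first non-empty index characterises A's leading trim
theorem dropWhile_eq_drop_head (xs : List String) (i : Int) (rest : List Int)
    (h : neOf xs = i :: rest) :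
    xs.dropWhile (fun s => s == "") = xs.drop i.toNat := by
  induction xs generalizing i rest with
  | nil => simp [neOf, PySem.List.enumerate_nil] at h
  | cons x xs ih =>
      rw [neOf_cons] at h
      by_cases hx : x = ""
      · rw [if_pos hx, List.nil_append] at h
        obtain ⟨i', rest', hne, hi⟩ : ∃ i' rest', neOf xs = i' :: rest' ∧ i = i' + 1 := by
          rcases hne : neOf xs with _ | ⟨i', rest'⟩
          · simp [hne] at h
          · rw [hne] at h
            simp only [List.map_cons, List.cons.injEq] at h
            exact ⟨i', rest', rfl, h.1.symm⟩
        have h0 : 0 ≤ i' := neOf_nonneg xs i' (by simp [hne])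
        have hnat : i.toNat = i'.toNat + 1 := by omega
        simp [hx, hnat, ih i' _ hne]
      · rw [if_neg hx] at h
        simp only [List.singleton_append, List.cons.injEq] at h
        simp [hx, ← h.1]

-- the last non-empty index characterises A's trailing trim
theorem rdropWhile_eq_take_last (xs : List String) (h : neOf xs ≠ []) :
    xs.rdropWhile (fun s => s == "") =
      xs.take (PySem.List.pyGetD (neOf xs) (-1) 0 + 1).toNat := by
  induction xs with
  | nil => simp [neOf, PySem.List.enumerate_nil] at h
  | cons x xs ih =>
      rw [PySem.List.pyGetD_neg_one _ _ h]
      rcases hne : neOf xs with _ | ⟨i', rest'⟩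
      · -- tail all blank: result is [x] (x must be non-empty)
        have hall : ∀ y ∈ xs, y = "" := (neOf_eq_nil_iff xs).mp hne
        have hx : ¬ x = "" := by
          intro hx
          apply h
          rw [neOf_cons, hne, hx]; simp
        have hlast : (neOf (x :: xs)).getLast h = 0 := by
          have : neOf (x :: xs) = [0] := by rw [neOf_cons, hne]; simp [hx]
          simp [this]
        rw [hlast]
        have hrev : xs.reverse.dropWhile (fun s => s == "") = [] := by
          rw [List.dropWhile_eq_nil_iff]
          intro y hy; simp [hall y (List.mem_reverse.mp hy)]
        rw [List.rdropWhile]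
        simp only [List.reverse_cons, List.dropWhile_append, hrev]
        simp [hx]
      · -- tail has a non-empty line: keep x and recurse
        have hne' : neOf xs ≠ [] := by simp [hne]
        have hex : ∃ y ∈ xs, ¬ (y == "") = true := by
          by_contra hc
          push Not at hc
          exact hne' ((neOf_eq_nil_iff xs).mpr (fun y hy => by simpa using hc y hy))
        have hrevne : xs.reverse.dropWhile (fun s => s == "") ≠ [] := by
          rw [Ne, List.dropWhile_eq_nil_iff]
          push Not
          obtain ⟨y, hy, hqy⟩ := hex
          exact ⟨y, List.mem_reverse.mpr hy, hqy⟩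
        have hcons : (x :: xs).rdropWhile (fun s => s == "") =
            x :: xs.rdropWhile (fun s => s == "") := by
          rw [List.rdropWhile, List.rdropWhile]
          simp only [List.reverse_cons, List.dropWhile_append]
          rw [if_neg (by simpa using hrevne)]
          simp
        have hlast : (neOf (x :: xs)).getLast h = (neOf xs).getLast hne' + 1 := by
          have hx2 : neOf (x :: xs) =
              (if x = "" then [] else [(0 : Int)]) ++ (neOf xs).map (· + 1) := neOf_cons x xs
          have hm : ((neOf xs).map (· + 1)) ≠ [] := by simpa using hne'
          rw [List.getLast_congr _ (fun hc => hm (List.append_eq_nil_iff.mp hc).2) hx2,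
              List.getLast_append_of_ne_nil _ hm, List.getLast_map]
        have h0 : 0 ≤ (neOf xs).getLast hne' := neOf_nonneg xs _ (List.getLast_mem hne')
        have ht : ((neOf xs).getLast hne' + 1 + 1).toNat
            = ((neOf xs).getLast hne' + 1).toNat + 1 := by omega
        rw [hcons, hlast, ht, List.take_succ_cons, ih hne']
        rw [PySem.List.pyGetD_neg_one _ _ hne']

-- removing trailing blanks commutes with dropping the leading blank prefix
theorem rdropWhile_drop (xs : List String) (n : Nat) (hn : n ≤ xs.length)
    (hex : ∃ y ∈ xs.drop n, ¬ (y == "") = true) :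
    (xs.drop n).rdropWhile (fun s => s == "") =
      (xs.rdropWhile (fun s => s == "")).drop n := by
  have hrevne : (xs.drop n).reverse.dropWhile (fun s => s == "") ≠ [] := by
    rw [Ne, List.dropWhile_eq_nil_iff]
    push Not
    obtain ⟨y, hy, hqy⟩ := hex
    exact ⟨y, List.mem_reverse.mpr hy, hqy⟩
  have key : xs.rdropWhile (fun s => s == "") =
      xs.take n ++ (xs.drop n).rdropWhile (fun s => s == "") := by
    conv_lhs => rw [← List.take_append_drop n xs]
    rw [List.rdropWhile, List.reverse_append, List.dropWhile_append]
    rw [if_neg (by simpa using hrevne)]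
    rw [List.reverse_append, List.reverse_reverse, List.rdropWhile]
  rw [key]
  generalize hpre : xs.take n = pre
  have hlen : pre.length = n := by rw [← hpre]; exact List.length_take_of_le hn
  rw [← hlen, List.drop_left]

-- the central list fact: A's two destructive loops equal B's one slice
theorem trim_eq (xs : List String) :
    dropTrailingBlank (dropLeadingBlank xs) = trimBlankEnds xs := by
  rw [dropLeadingBlank_eq_dropWhile, dropTrailingBlank_eq_rdropWhile]
  rcases hne : neOf xs with _ | ⟨i, rest⟩
  · have htrim : trimBlankEnds xs = [] := by unfold trimBlankEnds; rw [hne]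
    have : xs.dropWhile (fun s => s == "") = [] := by
      rw [List.dropWhile_eq_nil_iff]
      intro y hy; simp [(neOf_eq_nil_iff xs).mp hne y hy]
    simp [this, htrim]
  · have h0 : 0 ≤ i := neOf_nonneg xs i (by simp [hne])
    have hd : xs.dropWhile (fun s => s == "") = xs.drop i.toNat :=
      dropWhile_eq_drop_head xs i rest hne
    have hne' : neOf xs ≠ [] := by simp [hne]
    have hdne : xs.drop i.toNat ≠ [] := by
      rw [← hd, Ne, List.dropWhile_eq_nil_iff]
      push Not
      obtain ⟨y, hy, hqy⟩ : ∃ y ∈ xs, ¬ (y == "") = true := by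
        by_contra hc
        push Not at hc
        exact hne' ((neOf_eq_nil_iff xs).mpr (fun y hy => by simpa using hc y hy))
      exact ⟨y, hy, hqy⟩
    have hn : i.toNat ≤ xs.length := by
      by_contra hc
      exact hdne (List.drop_eq_nil_of_le (by omega))
    have hex : ∃ y ∈ xs.drop i.toNat, ¬ (y == "") = true := by
      rw [← hd]
      have hdw : xs.dropWhile (fun s => s == "") ≠ [] := by rw [hd]; exact hdne
      exact ⟨_, List.head_mem hdw, by simpa using List.head_dropWhile_not _ hdw⟩
    have hj0 : 0 ≤ PySem.List.pyGetD (neOf xs) (-1) 0 := by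
      rw [PySem.List.pyGetD_neg_one _ _ hne']
      exact neOf_nonneg xs _ (List.getLast_mem hne')
    have htrim : trimBlankEnds xs =
        PySem.List.slice xs (some i) (some (PySem.List.pyGetD (i :: rest) (-1) 0 + 1)) := by
      unfold trimBlankEnds; rw [hne]
    rw [← hne] at htrim
    rw [htrim, hd, rdropWhile_drop xs i.toNat hn hex, rdropWhile_eq_take_last xs hne']
    rw [PySem.List.slice_toNat xs h0 (by omega)]
    rw [List.drop_take]

-- ===== VERDICT (by name: the statement is the Claim_ definition above) =====
theorem multiline_spec : Claim_equal_multiline := by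
  intro text _
  unfold Spec_multiline multiline multiline_alt
  simp only []
  rw [trim_eq]
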